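-- pv_equiv track=rewrite | github.com/giladbarnea/IGit | igit/util/termcolor.py | get_color_by_code
-- ===== SOURCE A (Python) =====
-- from typing import Optional, Union
--
-- COLOR_CODES = dict(
--         bold=1,
--         grey=2,
--         italic=3,
--         ul=4,
--         inverse=7,
--         strike=9,
--         reset=dict(normal=0,
--                    italic=23,
--                    ul=24,
--                    inverse=27,
--                    strike=29,
--                    ),
--         doubleul=21,
--         red=31,
--         green=32,
--         yellow=33,
--         blue=34,
--         purple=35,
--         turquoise=36,
--         white=37,
--         bg=dict(grey=40,
--                 red=41,
--                 green=42,
--                 yellow=43,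
--                 blue=44,
--                 purple=45,
--                 turquoise=46,
--                 white=47, ),
--         sat=dict(red=91,
--                  green=92,
--                  yellow=93,
--                  blue=94,
--                  purple=95,
--                  turquoise=96,
--                  white=97,
--                  bg=dict(grey=100,
--                          red=101,
--                          green=102,
--                          yellow=103,
--                          blue=104,
--                          purple=105,
--                          turquoise=106,
--                          white=107)
--                  ),
--         lightgrey=90,
--
--         )
--
-- def get_color_by_code(_code: int, _obj=None) -> Optional[str]:
--     if _obj is None:
--         _obj = COLOR_CODES
--     for k, v in _obj.items():
--         if not isinstance(v, dict):
--             if v == _code: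
--                 return k
--         else:
--             nested = get_color_by_code(_code, _obj[k])
--             if nested is not None:
--                 return f'{k} {nested}'
--     return None  # recursive stop cond
-- ===== SOURCE B (Python) =====
-- from typing import Optional
--
-- # The default table, stored directly in its flattened reverse form:
-- # (space-joined key path, code) pairs in the nested dict's DFS insertion order.
-- _FLAT_CODES = [
--     ('bold', 1), ('grey', 2), ('italic', 3), ('ul', 4), ('inverse', 7),
--     ('strike', 9), ('reset normal', 0), ('reset italic', 23), ('reset ul', 24),
--     ('reset inverse', 27), ('reset strike', 29), ('doubleul', 21), ('red', 31),
--     ('green', 32), ('yellow', 33), ('blue', 34), ('purple', 35),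
--     ('turquoise', 36), ('white', 37), ('bg grey', 40), ('bg red', 41),
--     ('bg green', 42), ('bg yellow', 43), ('bg blue', 44), ('bg purple', 45),
--     ('bg turquoise', 46), ('bg white', 47), ('sat red', 91), ('sat green', 92),
--     ('sat yellow', 93), ('sat blue', 94), ('sat purple', 95),
--     ('sat turquoise', 96), ('sat white', 97), ('sat bg grey', 100),
--     ('sat bg red', 101), ('sat bg green', 102), ('sat bg yellow', 103),
--     ('sat bg blue', 104), ('sat bg purple', 105), ('sat bg turquoise', 106),
--     ('sat bg white', 107), ('lightgrey', 90),
-- ]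
--
-- def _flatten(d, prefix=''):
--     """Flatten a nested color dict into (space-joined path, code) pairs in DFS insertion order."""
--     out = []
--     for k, v in d.items():
--         if isinstance(v, dict):
--             out.extend(_flatten(v, prefix + k + ' '))
--         else:
--             out.append((prefix + k, v))
--     return out
--
-- def get_color_by_code(_code: int, _obj=None) -> Optional[str]:
--     # Two staged passes instead of interleaved recursion: a flat path->code
--     # table (precomputed for the default), then the first pair whose code matches.
--     pairs = _FLAT_CODES if _obj is None else _flatten(_obj)
--     return next((path for path, v in pairs if v == _code), None)
-- ===== Notes on version B (the rewrite author's own statement) =====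
-- stated objective: alternative
-- what changed: Replaces A's interleaved recursion (which builds the path string while unwinding) by two staged passes: the default nested table is kept pre-flattened as (space-joined path, code) pairs and an explicit _obj is flattened by one helper pass, after which the answer is simply the first pair whose code matches.
import Mathlib
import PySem

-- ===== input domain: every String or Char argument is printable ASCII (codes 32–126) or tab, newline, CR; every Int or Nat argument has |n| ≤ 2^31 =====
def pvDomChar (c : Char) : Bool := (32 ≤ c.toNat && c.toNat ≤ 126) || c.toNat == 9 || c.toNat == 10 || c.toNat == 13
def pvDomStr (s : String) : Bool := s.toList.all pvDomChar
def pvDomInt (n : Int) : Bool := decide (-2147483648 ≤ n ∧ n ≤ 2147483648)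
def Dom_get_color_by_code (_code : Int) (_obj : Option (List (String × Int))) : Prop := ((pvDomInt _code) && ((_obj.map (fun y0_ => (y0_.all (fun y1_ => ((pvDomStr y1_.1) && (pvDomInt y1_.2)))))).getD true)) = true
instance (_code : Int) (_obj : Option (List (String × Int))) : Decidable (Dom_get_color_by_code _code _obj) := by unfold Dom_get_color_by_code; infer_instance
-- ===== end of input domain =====

-- B replaces A's interleaved recursion (descend + build the path on the way back up) by two
-- staged passes: flatten the table once into (space-joined path, code) pairs, then take the
-- first pair whose code matches (alternative decomposition, same value everywhere).
-- Note: the Lean argument type is flat (String × Int), so an explicitly passed _obj never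
-- contains a nested dict; the nested case arises only for the default COLOR_CODES constant,
-- modelled by the mutual inductive CVal/CDict below.

-- ===== PORT A =====
-- nested string→(int | dict) structure of COLOR_CODES (mutual pair, no nested inductive)
mutual
inductive CVal : Type where
  | i : Int → CVal
  | d : CDict → CVal
deriving Repr, DecidableEq
inductive CDict : Type where
  | nil : CDict
  | cons : String → CVal → CDict → CDict
deriving Repr, DecidableEq
end

def cdictOf : List (String × CVal) → CDict
  | [] => .nil
  | (k, v) :: r => .cons k v (cdictOf r)

def COLOR_CODES : CDict := cdictOf
  [("bold", .i 1), ("grey", .i 2), ("italic", .i 3), ("ul", .i 4), ("inverse", .i 7),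
   ("strike", .i 9),
   ("reset", .d (cdictOf [("normal", .i 0), ("italic", .i 23), ("ul", .i 24),
                          ("inverse", .i 27), ("strike", .i 29)])),
   ("doubleul", .i 21), ("red", .i 31), ("green", .i 32), ("yellow", .i 33),
   ("blue", .i 34), ("purple", .i 35), ("turquoise", .i 36), ("white", .i 37),
   ("bg", .d (cdictOf [("grey", .i 40), ("red", .i 41), ("green", .i 42), ("yellow", .i 43),
                       ("blue", .i 44), ("purple", .i 45), ("turquoise", .i 46), ("white", .i 47)])),
   ("sat", .d (cdictOf [("red", .i 91), ("green", .i 92), ("yellow", .i 93), ("blue", .i 94),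
                        ("purple", .i 95), ("turquoise", .i 96), ("white", .i 97),
                        ("bg", .d (cdictOf [("grey", .i 100), ("red", .i 101), ("green", .i 102),
                                            ("yellow", .i 103), ("blue", .i 104), ("purple", .i 105),
                                            ("turquoise", .i 106), ("white", .i 107)]))]))
   , ("lightgrey", .i 90)]

-- A's recursive loop over a nested dict: leaf that matches returns its key,
-- dict value recurses and prefixes the key with a space on success.
def auxA (code : Int) : CDict → Option String
  | .nil => none
  | .cons k (.i v) r => if v = code then some k else auxA code r
  | .cons k (.d dd) r =>
      match auxA code dd with
      | some nested => some (k ++ " " ++ nested)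
      | none => auxA code r

-- A's same loop on an explicitly passed flat dict: isinstance(v, dict) is always False.
def scanA (code : Int) : List (String × Int) → Option String
  | [] => none
  | (k, v) :: r => if v = code then some k else scanA code r

def get_color_by_code (_code : Int) (_obj : Option (List (String × Int))) : Option String :=
  match _obj with
  | none => auxA _code COLOR_CODES
  | some l => scanA _code (PySem.Dict.ofList l).items   -- dict(l).items(): first-key order, last value

-- ===== PORT B =====
-- Source B's module constant _FLAT_CODES = _flatten(COLOR_CODES): the default table flattened
-- once, at load time, into (space-joined path, code) pairs in DFS insertion order.
def FLAT_CODES : List (String × Int) :=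
  [("bold", 1), ("grey", 2), ("italic", 3), ("ul", 4), ("inverse", 7), ("strike", 9),
   ("reset normal", 0), ("reset italic", 23), ("reset ul", 24), ("reset inverse", 27),
   ("reset strike", 29), ("doubleul", 21), ("red", 31), ("green", 32), ("yellow", 33),
   ("blue", 34), ("purple", 35), ("turquoise", 36), ("white", 37),
   ("bg grey", 40), ("bg red", 41), ("bg green", 42), ("bg yellow", 43), ("bg blue", 44),
   ("bg purple", 45), ("bg turquoise", 46), ("bg white", 47),
   ("sat red", 91), ("sat green", 92), ("sat yellow", 93), ("sat blue", 94),
   ("sat purple", 95), ("sat turquoise", 96), ("sat white", 97),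
   ("sat bg grey", 100), ("sat bg red", 101), ("sat bg green", 102), ("sat bg yellow", 103),
   ("sat bg blue", 104), ("sat bg purple", 105), ("sat bg turquoise", 106),
   ("sat bg white", 107), ("lightgrey", 90)]

def get_color_by_code_alt (_code : Int) (_obj : Option (List (String × Int))) : Option String :=
  -- pairs = _FLAT_CODES if _obj is None else _flatten(_obj); on a flat dict _flatten
  -- returns exactly its ('' + k, v) items in dict order.
  let pairs : List (String × Int) :=
    match _obj with
    | none => FLAT_CODES
    | some l => (PySem.Dict.ofList l).items
  -- next((path for path, v in pairs if v == _code), None)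
  (pairs.find? (fun pv => pv.2 == _code)).map Prod.fst

-- ===== PRECONDITION & SPEC =====
def Spec_get_color_by_code (_code : Int) (_obj : Option (List (String × Int))) (out : Option String) : Prop := out = get_color_by_code_alt _code _obj
instance (_code : Int) (_obj : Option (List (String × Int))) (out : Option String) : Decidable (Spec_get_color_by_code _code _obj out) := by unfold Spec_get_color_by_code; infer_instance

-- ===== CLAIM (what is proved, stated in full; the proofs are below) =====
def Claim_equal_get_color_by_code : Prop := ∀ (_code : Int) (_obj : Option (List (String × Int))), Dom_get_color_by_code _code _obj → Spec_get_color_by_code _code _obj (get_color_by_code _code _obj)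

-- ===== LEMMAS AND PROOFS =====

-- proof-only flattener (mirrors Source B's _flatten on the nested structure)
def flat (p : String) : CDict → List (String × Int)
  | .nil => []
  | .cons k (.i v) r => (p ++ k, v) :: flat p r
  | .cons k (.d dd) r => flat (p ++ k ++ " ") dd ++ flat p r

mutual
def sizeV : CVal → Nat
  | .i _ => 1
  | .d dd => 1 + sizeD dd
def sizeD : CDict → Nat
  | .nil => 0
  | .cons _ v r => sizeV v + sizeD r
end

theorem find_flat (code : Int) :
    ∀ (d : CDict) (p : String),
      ((flat p d).find? (fun pv => pv.2 == code)).map Prod.fst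
        = (auxA code d).map (fun s => p ++ s)
  | .nil, p => by simp [flat, auxA]
  | .cons k (.i v) r, p => by
      by_cases h : v = code
      · simp [flat, auxA, h, List.find?_cons_of_pos]
      · rw [flat, List.find?_cons_of_neg (by simp [h])]
        simp only [auxA, h, if_false]
        exact find_flat code r p
  | .cons k (.d dd) r, p => by
      simp only [flat, auxA, List.find?_append]
      cases hdd : auxA code dd with
      | some s =>
          have h1 := find_flat code dd (p ++ k ++ " ")
          rw [hdd] at h1
          cases hf : (flat (p ++ k ++ " ") dd).find? (fun pv => pv.2 == code) with
          | none => rw [hf] at h1; simp at h1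
          | some e =>
              rw [hf] at h1
              simp only [Option.some_or, Option.map_some] at h1 ⊢
              simp [h1, String.append_assoc]
      | none =>
          have h1 := find_flat code dd (p ++ k ++ " ")
          rw [hdd] at h1
          cases hf : (flat (p ++ k ++ " ") dd).find? (fun pv => pv.2 == code) with
          | some e => rw [hf] at h1; simp at h1
          | none =>
              simp only [Option.none_or]
              exact find_flat code r p
  termination_by d => sizeD d
  decreasing_by all_goals (simp [sizeD, sizeV]; try omega)

theorem flat_COLOR_CODES : flat "" COLOR_CODES = FLAT_CODES := by decide

theorem find_scan (code : Int) (l : List (String × Int)) :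
    ((l.find? (fun pv => pv.2 == code)).map Prod.fst) = scanA code l := by
  induction l with
  | nil => simp [scanA]
  | cons kv r ih =>
      obtain ⟨k, v⟩ := kv
      by_cases h : v = code
      · simp [scanA, h, List.find?_cons_of_pos]
      · rw [List.find?_cons_of_neg (by simp [h])]
        simp only [scanA, h, if_false]
        exact ih

-- ===== VERDICT (by name: the statement is the Claim_ definition above) =====
theorem get_color_by_code_spec : Claim_equal_get_color_by_code := by
  intro _code _obj _hdom
  cases _obj with
  | none =>
      simp only [Spec_get_color_by_code, get_color_by_code, get_color_by_code_alt]
      rw [← flat_COLOR_CODES, find_flat]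
      cases auxA _code COLOR_CODES <;> simp

  | some l =>
      simp only [Spec_get_color_by_code, get_color_by_code, get_color_by_code_alt]
      rw [find_scan]
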